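-- pv_equiv track=rewrite | github.com/TanmayKhot/hurdle-wordle-eval | hurdle_wordle.py | calculate_hurdle_feedback
-- ===== SOURCE A (Python) =====
-- from typing import Optional, Tuple, List, Dict, Any
--
-- def calculate_hurdle_feedback(guess: str, secret: str) -> Tuple[int, int]:
--     """
--     Calculate greens and yellows for Hurdle Wordle.
--
--     Args:
--         guess: The guessed word
--         secret: The secret word
--
--     Returns:
--         Tuple of (greens, yellows) counts
--     """
--     greens = 0
--     yellows = 0
--
--     guess = guess.lower()
--     secret = secret.lower()
--
--     # Create lists to track which positions have been used
--     secret_used = [False] * len(secret)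
--     guess_used = [False] * len(guess)
--
--     # First pass: count greens (correct position)
--     for i in range(min(len(guess), len(secret))):
--         if guess[i] == secret[i]:
--             greens += 1
--             secret_used[i] = True
--             guess_used[i] = True
--
--     # Second pass: count yellows (correct letter, wrong position)
--     for i in range(len(guess)):
--         if not guess_used[i]:  # This position wasn't a green match
--             letter = guess[i]
--             # Look for this letter in unused positions of secret
--             for j in range(len(secret)):
--                 if not secret_used[j] and secret[j] == letter:
--                     yellows += 1
--                     secret_used[j] = True  # Mark this secret position as used
--                     break  # Only count one match per guess letter
--
--     return greens, yellows
-- ===== SOURCE B (Python) =====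
-- def calculate_hurdle_feedback(guess: str, secret: str):
--     """Single-pass counter version: count non-green secret letters once,
--     then consume them per non-green guess letter (O(n+m) vs A's O(n*m))."""
--     g = guess.lower()
--     s = secret.lower()
--
--     greens = sum(a == b for a, b in zip(g, s))
--
--     # multiset of secret letters not used by a green match
--     remaining = {}
--     for a, b in zip(g, s):
--         if a != b:
--             remaining[b] = remaining.get(b, 0) + 1
--     for b in s[len(g):]:
--         remaining[b] = remaining.get(b, 0) + 1
--
--     yellows = 0
--     for a, b in zip(g, s):
--         if a != b and remaining.get(a, 0) > 0:
--             remaining[a] = remaining.get(a, 0) - 1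
--             yellows += 1
--     for a in g[len(s):]:
--         if remaining.get(a, 0) > 0:
--             remaining[a] = remaining.get(a, 0) - 1
--             yellows += 1
--     return greens, yellows
-- ===== Notes on version B (the rewrite author's own statement) =====
-- stated objective: faster
-- what changed: Replaced the inner linear scan of the secret for each non-green guess letter (with used-position flags) by a dict multiset of non-green secret letters built once and decremented per guess letter.
import Mathlib
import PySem

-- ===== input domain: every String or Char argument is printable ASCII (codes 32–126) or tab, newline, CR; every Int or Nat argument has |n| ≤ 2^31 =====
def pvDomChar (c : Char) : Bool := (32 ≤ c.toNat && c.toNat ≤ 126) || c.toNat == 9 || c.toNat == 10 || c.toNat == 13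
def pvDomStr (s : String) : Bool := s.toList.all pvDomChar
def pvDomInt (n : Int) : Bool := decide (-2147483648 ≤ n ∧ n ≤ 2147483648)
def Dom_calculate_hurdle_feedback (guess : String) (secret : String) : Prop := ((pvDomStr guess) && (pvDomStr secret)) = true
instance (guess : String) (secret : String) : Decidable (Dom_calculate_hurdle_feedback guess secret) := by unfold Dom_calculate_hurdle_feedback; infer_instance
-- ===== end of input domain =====

-- B replaces A's per-letter linear rescan of the secret (used-position flags) by a
-- counter dict of the non-green secret letters built once and decremented per guess letter.

-- ===== PORT A =====
-- inner 'for j in range(len(secret)) … break' loop of A's yellow pass, over the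
-- (used?, char) pairs of the secret; some = list after marking the hit, none = no hit
def pvScanA (letter : Char) : List (Bool × Char) → Option (List (Bool × Char))
  | [] => none
  | (u, c) :: rest =>
    if u = false ∧ c = letter then some ((true, c) :: rest)
    else (pvScanA letter rest).map (fun r => (u, c) :: r)

-- A's first pass over i < min(len g, len s): greens count plus the
-- (used?, char) lists for secret and guess (positions past min stay unused)
def pvPass1A : List Char → List Char → Int × List (Bool × Char) × List (Bool × Char)
  | a :: g, b :: s =>
    let r := pvPass1A g s
    if a = b then (r.1 + 1, (true, b) :: r.2.1, (true, a) :: r.2.2)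
    else (r.1, (false, b) :: r.2.1, (false, a) :: r.2.2)
  | [], s => (0, s.map (fun b => (false, b)), [])
  | a :: g, [] => (0, [], (a :: g).map (fun x => (false, x)))

-- A's second pass over the guess positions
def pvPass2A : List (Bool × Char) → List (Bool × Char) → Int → Int × List (Bool × Char)
  | [], su, ye => (ye, su)
  | (u, a) :: gu, su, ye =>
    if u = true then pvPass2A gu su ye
    else
      match pvScanA a su with
      | some su' => pvPass2A gu su' (ye + 1)
      | none => pvPass2A gu su ye

def calculate_hurdle_feedback (guess : String) (secret : String) : List Int :=
  let g := PySem.Chars.lower guess.toList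
  let s := PySem.Chars.lower secret.toList
  let r1 := pvPass1A g s
  let r2 := pvPass2A r1.2.2 r1.2.1 0
  [r1.1, r2.1]

-- ===== PORT B =====
def calculate_hurdle_feedback_alt (guess : String) (secret : String) : List Int :=
  let g := PySem.Chars.lower guess.toList
  let s := PySem.Chars.lower secret.toList
  let z := List.zip g s
  let greens : Int := (z.map (fun p => if p.1 = p.2 then (1 : Int) else 0)).sum
  let rem0 := z.foldl
    (fun (d : PySem.Dict Char Int) p =>
      if p.1 ≠ p.2 then d.insert p.2 (d.getD p.2 0 + 1) else d) PySem.Dict.empty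
  let rem1 := (PySem.List.slice s (some (g.length : Int)) none).foldl
    (fun (d : PySem.Dict Char Int) b => d.insert b (d.getD b 0 + 1)) rem0
  let st1 := z.foldl
    (fun (st : Int × PySem.Dict Char Int) p =>
      if p.1 ≠ p.2 ∧ st.2.getD p.1 0 > 0 then (st.1 + 1, st.2.insert p.1 (st.2.getD p.1 0 - 1))
      else st) (0, rem1)
  let st2 := (PySem.List.slice g (some (s.length : Int)) none).foldl
    (fun (st : Int × PySem.Dict Char Int) a =>
      if st.2.getD a 0 > 0 then (st.1 + 1, st.2.insert a (st.2.getD a 0 - 1)) else st) st1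
  [greens, st2.1]

-- ===== PRECONDITION & SPEC =====
def Spec_calculate_hurdle_feedback (guess : String) (secret : String) (out : List Int) : Prop := out = calculate_hurdle_feedback_alt guess secret
instance (guess : String) (secret : String) (out : List Int) : Decidable (Spec_calculate_hurdle_feedback guess secret out) := by unfold Spec_calculate_hurdle_feedback; infer_instance

-- ===== CLAIM (what is proved, stated in full; the proofs are below) =====
def Claim_equal_calculate_hurdle_feedback : Prop := ∀ (guess : String) (secret : String), Dom_calculate_hurdle_feedback guess secret → Spec_calculate_hurdle_feedback guess secret (calculate_hurdle_feedback guess secret)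

-- ===== LEMMAS AND PROOFS =====

-- multiset view of A's marked secret: how many unused positions carry letter c
def pvCnt (su : List (Bool × Char)) (c : Char) : Nat :=
  su.countP (fun p => !p.1 && p.2 == c)

-- the step of B's yellow loop, over generic (skip?, letter) pairs
def pvStep (st : Int × PySem.Dict Char Int) (p : Bool × Char) : Int × PySem.Dict Char Int :=
  if p.1 then st
  else if st.2.getD p.2 0 > 0 then (st.1 + 1, st.2.insert p.2 (st.2.getD p.2 0 - 1)) else st

lemma pvScanA_none {letter : Char} {su : List (Bool × Char)}
    (h : pvScanA letter su = none) : pvCnt su letter = 0 := by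
  induction su with
  | nil => simp [pvCnt]
  | cons p rest ih =>
    obtain ⟨u, c⟩ := p
    by_cases huc : u = false ∧ c = letter
    · simp [pvScanA, huc] at h
    · rw [pvScanA, if_neg huc] at h
      simp only [Option.map_eq_none_iff] at h
      have h0 := ih h
      simp only [pvCnt, List.countP_cons] at h0 ⊢
      cases u with
      | false =>
        have hc : (c == letter) = false := by
          simp only [beq_eq_false_iff_ne, ne_eq]
          exact fun hcl => huc ⟨rfl, hcl⟩
        simp [h0, hc]
      | true => simp [h0]

lemma pvScanA_some {letter : Char} {su su' : List (Bool × Char)}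
    (h : pvScanA letter su = some su') :
    0 < pvCnt su letter ∧
      ∀ c, pvCnt su' c = if c = letter then pvCnt su letter - 1 else pvCnt su c := by
  induction su generalizing su' with
  | nil => simp [pvScanA] at h
  | cons p rest ih =>
    obtain ⟨u, c⟩ := p
    by_cases huc : u = false ∧ c = letter
    · rw [pvScanA, if_pos huc] at h
      obtain ⟨hu, hc⟩ := huc
      subst hu; subst hc
      cases h
      refine ⟨by simp [pvCnt], ?_⟩
      intro c'
      by_cases hc' : c' = c
      · subst hc'; simp [pvCnt]
      · have : (c == c') = false := by
          simp only [beq_eq_false_iff_ne, ne_eq]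
          exact fun hcc => hc' hcc.symm
        simp [pvCnt, this, hc']
    · rw [pvScanA, if_neg huc] at h
      simp only [Option.map_eq_some_iff] at h
      obtain ⟨r, hr, hsu'⟩ := h
      subst hsu'
      obtain ⟨hpos, hcnt⟩ := ih hr
      have hskip : (!u && c == letter) = false := by
        cases u with
        | true => simp
        | false =>
          simp only [Bool.not_false, Bool.true_and, beq_eq_false_iff_ne, ne_eq]
          exact fun hcl => huc ⟨rfl, hcl⟩
      refine ⟨by simpa [pvCnt, List.countP_cons, hskip] using hpos, ?_⟩
      intro c'
      have hrec := hcnt c'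
      by_cases hc' : c' = letter
      · subst hc'
        rw [if_pos rfl] at hrec
        simp only [pvCnt, List.countP_cons] at hrec hpos ⊢
        simp [hskip] at hrec hpos ⊢
        omega
      · rw [if_neg hc'] at hrec
        simp only [pvCnt, List.countP_cons] at hrec ⊢
        simp [hc', hrec]

lemma pvPass2A_eq (l : List (Bool × Char)) :
    ∀ (su : List (Bool × Char)) (rem : PySem.Dict Char Int) (ye : Int),
      (∀ c, rem.getD c 0 = (pvCnt su c : Int)) →
      (pvPass2A l su ye).1 = (l.foldl pvStep (ye, rem)).1 := by
  induction l with
  | nil => intro su rem ye _; rfl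
  | cons p tl ih =>
    intro su rem ye hinv
    obtain ⟨u, a⟩ := p
    cases u with
    | true =>
      rw [pvPass2A, if_pos rfl]
      simp only [List.foldl_cons]
      have hstep : pvStep (ye, rem) (true, a) = (ye, rem) := by simp [pvStep]
      rw [hstep]
      exact ih su rem ye hinv
    | false =>
      rw [pvPass2A, if_neg Bool.false_ne_true]
      simp only [List.foldl_cons]
      have hstep : pvStep (ye, rem) (false, a)
          = if rem.getD a 0 > 0 then (ye + 1, rem.insert a (rem.getD a 0 - 1)) else (ye, rem) := by
        simp [pvStep]
      cases hscan : pvScanA a su with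
      | none =>
        have hz := pvScanA_none hscan
        have hng : ¬ rem.getD a 0 > 0 := by rw [hinv a, hz]; simp
        rw [hstep, if_neg hng]
        exact ih su rem ye hinv
      | some su' =>
        obtain ⟨hpos, hcnt⟩ := pvScanA_some hscan
        have hgt : rem.getD a 0 > 0 := by rw [hinv a]; exact_mod_cast hpos
        rw [hstep, if_pos hgt]
        refine ih su' _ (ye + 1) ?_
        intro c
        by_cases hc : c = a
        · subst hc
          rw [PySem.Dict.getD_insert_self, hcnt c, if_pos rfl, hinv c]
          have := hpos
          omega
        · rw [PySem.Dict.getD_insert_of_ne _ _ _ hc, hcnt c, if_neg hc, hinv c]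

lemma pvPass1A_eq (g : List Char) : ∀ (s : List Char),
    pvPass1A g s =
      (((List.zip g s).map (fun p => if p.1 = p.2 then (1 : Int) else 0)).sum,
       (List.zip g s).map (fun p => (decide (p.1 = p.2), p.2)) ++ (s.drop g.length).map (fun b => (false, b)),
       (List.zip g s).map (fun p => (decide (p.1 = p.2), p.1)) ++ (g.drop s.length).map (fun a => (false, a))) := by
  induction g with
  | nil => intro s; simp [pvPass1A]
  | cons a g ih =>
    intro s
    cases s with
    | nil => simp [pvPass1A]
    | cons b s =>
      rw [pvPass1A, ih s]
      by_cases hab : a = b <;> simp [hab, add_comm]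

-- B's counter after its two build loops equals the multiset of A's unused secret positions
lemma pvRem1_spec (g s : List Char) (c : Char) :
    ((PySem.List.slice s (some (g.length : Int)) none).foldl
        (fun (d : PySem.Dict Char Int) b => d.insert b (d.getD b 0 + 1))
        ((List.zip g s).foldl
          (fun (d : PySem.Dict Char Int) p =>
            if p.1 ≠ p.2 then d.insert p.2 (d.getD p.2 0 + 1) else d) PySem.Dict.empty)).getD c 0
    = (pvCnt ((List.zip g s).map (fun p => (decide (p.1 = p.2), p.2))
        ++ (s.drop g.length).map (fun b => (false, b)) ) c : Nat) := by
  rw [PySem.List.slice_from_natCast, PySem.Dict.getD_foldl_insert_add_one]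
  rw [PySem.List.foldl_ite_eq_foldl_filter (p := fun p : Char × Char => p.1 ≠ p.2)]
  rw [← List.foldl_map (f := fun q : Char × Char => q.2)
        (g := fun (d : PySem.Dict Char Int) (x : Char) => d.insert x (d.getD x 0 + 1))]
  rw [PySem.Dict.getD_foldl_insert_add_one]
  simp only [PySem.Dict.getD_empty, zero_add, pvCnt, List.countP_append, List.countP_map,
    List.count_eq_countP, List.countP_filter]
  push_cast
  have e1 : List.countP (fun a : Char × Char => ((fun x => x == c) ∘ fun q : Char × Char => q.2) a && decide (a.1 ≠ a.2)) (g.zip s)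
      = List.countP ((fun p : Bool × Char => !p.1 && p.2 == c) ∘ fun p : Char × Char => (decide (p.1 = p.2), p.2)) (g.zip s) := by
    apply List.countP_congr
    intro p _
    simp only [Function.comp_apply]
    by_cases h : p.1 = p.2 <;> simp [h, Bool.and_comm]
  have e2 : List.countP (fun x : Char => x == c) (List.drop g.length s)
      = List.countP ((fun p : Bool × Char => !p.1 && p.2 == c) ∘ fun b : Char => (false, b)) (List.drop g.length s) := by
    apply List.countP_congr
    intro b _
    simp [Function.comp]
  rw [e1, e2]

-- ===== VERDICT (by name: the statement is the Claim_ definition above) =====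
theorem calculate_hurdle_feedback_spec : Claim_equal_calculate_hurdle_feedback := by
  intro guess secret _
  unfold Spec_calculate_hurdle_feedback calculate_hurdle_feedback calculate_hurdle_feedback_alt
  set g := PySem.Chars.lower guess.toList with hg
  set s := PySem.Chars.lower secret.toList with hs
  simp only [pvPass1A_eq g s]
  rw [pvPass2A_eq _ _ _ 0 (pvRem1_spec g s)]
  rw [List.foldl_append, List.foldl_map, List.foldl_map]
  have h1 : (fun (st : Int × PySem.Dict Char Int) (p : Char × Char) => pvStep st (decide (p.1 = p.2), p.1))
      = (fun st p => if p.1 ≠ p.2 ∧ st.2.getD p.1 0 > 0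
          then (st.1 + 1, st.2.insert p.1 (st.2.getD p.1 0 - 1)) else st) := by
    funext st p
    by_cases hp : p.1 = p.2
    · simp [pvStep, hp]
    · by_cases hgt : st.2.getD p.1 0 > 0 <;> simp [pvStep, hp, hgt]
  have h2 : (fun (st : Int × PySem.Dict Char Int) (a : Char) => pvStep st (false, a))
      = (fun st a => if st.2.getD a 0 > 0
          then (st.1 + 1, st.2.insert a (st.2.getD a 0 - 1)) else st) := by
    funext st a
    simp [pvStep]
  rw [h1, h2, PySem.List.slice_from_natCast g s.length]
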